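-- pv_equiv track=rewrite | github.com/wonillin/leetcode | 프로그래머스/unrated/181837. 커피 심부름/커피 심부름.py | solution
-- ===== SOURCE A (Python) =====
-- def solution(order):
--     answer = 0
--
--     for i in order:
--         if 'ameri' in i:
--             answer += 4500
--         elif 'cafe' in i:
--             answer += 5000
--         else:
--             answer += 4500
--
--     return answer
-- ===== SOURCE B (Python) =====
-- MENU = [('ameri', 4500), ('cafe', 5000)]  # priority order: first matching keyword wins
-- DEFAULT_PRICE = 4500
--
-- def price(drink):
--     for key, cost in MENU:
--         if key in drink:
--             return cost
--     return DEFAULT_PRICE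
--
-- def solution(order):
--     if not order:
--         return 0
--     if len(order) == 1:
--         return price(order[0])
--     mid = len(order) // 2
--     return solution(order[:mid]) + solution(order[mid:])
-- ===== Notes on version B (the rewrite author's own statement) =====
-- stated objective: alternative
-- what changed: Replaces the single imperative loop with per-element if/elif/else accumulation by a table-driven pricing function (first matching keyword in a priority menu list, with a default) combined with divide-and-conquer: split the order list in half, recurse on each half, and add the two subtotals.
import Mathlib
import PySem

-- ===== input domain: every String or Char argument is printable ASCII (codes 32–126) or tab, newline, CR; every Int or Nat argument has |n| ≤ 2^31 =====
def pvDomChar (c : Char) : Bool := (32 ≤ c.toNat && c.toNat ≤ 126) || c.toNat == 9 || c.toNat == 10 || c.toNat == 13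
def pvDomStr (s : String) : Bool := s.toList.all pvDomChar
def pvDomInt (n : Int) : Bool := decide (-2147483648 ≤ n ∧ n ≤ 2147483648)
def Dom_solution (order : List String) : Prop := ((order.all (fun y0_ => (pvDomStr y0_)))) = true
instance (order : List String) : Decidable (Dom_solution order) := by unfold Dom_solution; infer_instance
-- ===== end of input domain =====

-- B replaces A's if/elif/else running total by a table-driven price lookup (priority menu list) plus head/tail recursion ('alternative').


-- ===== PORT A =====
def solution (order : List String) : Int :=
  order.foldl (fun answer i =>
    if PySem.Str.isIn "ameri" i then answer + 4500
    else if PySem.Str.isIn "cafe" i then answer + 5000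
    else answer + 4500) 0

-- ===== PORT B =====
def pvMenu : List (String × Int) := [("ameri", 4500), ("cafe", 5000)]

def pvDefaultPrice : Int := 4500

-- 'for key, cost in MENU: if key in drink: return cost / return DEFAULT_PRICE'
def pvPrice (menu : List (String × Int)) (drink : String) : Int :=
  match menu with
  | [] => pvDefaultPrice
  | (key, cost) :: rest => if PySem.Str.isIn key drink then cost else pvPrice rest drink

-- divide and conquer: order[:mid] / order[mid:] are take/drop with mid = len//2 (0 ≤ mid ≤ len, so slices = take/drop exactly)
def solution_alt (order : List String) : Int :=
  match order with
  | [] => 0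
  | [d] => pvPrice pvMenu d
  | a :: b :: t =>
      let mid := (a :: b :: t).length / 2
      solution_alt ((a :: b :: t).take mid) + solution_alt ((a :: b :: t).drop mid)
termination_by order.length
decreasing_by
  · simp [List.length_take]; omega
  · simp [List.length_drop]; omega

-- ===== PRECONDITION & SPEC =====
def Spec_solution (order : List String) (out : Int) : Prop := out = solution_alt order
instance (order : List String) (out : Int) : Decidable (Spec_solution order out) := by unfold Spec_solution; infer_instance

-- ===== CLAIM (what is proved, stated in full; the proofs are below) =====
def Claim_equal_solution : Prop := ∀ (order : List String), Dom_solution order → Spec_solution order (solution order)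

-- ===== LEMMAS AND PROOFS =====
def pvG (i : String) : Int :=
  if PySem.Str.isIn "ameri" i then 4500
  else if PySem.Str.isIn "cafe" i then 5000 else 4500

theorem pvPrice_eq (h : String) : pvPrice pvMenu h = pvG h := by
  show (if PySem.Str.isIn "ameri" h then (4500 : Int)
        else if PySem.Str.isIn "cafe" h then 5000 else pvDefaultPrice) = pvG h
  unfold pvG pvDefaultPrice
  rfl

theorem solution_eq_alt (order : List String) : solution order = solution_alt order := by
  unfold solution
  have hfun : (fun (answer : Int) (i : String) =>
      if PySem.Str.isIn "ameri" i then answer + 4500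
      else if PySem.Str.isIn "cafe" i then answer + 5000
      else answer + 4500)
      = fun (answer : Int) (i : String) => answer + pvG i := by
    funext a i; unfold pvG; split_ifs <;> rfl
  rw [hfun, PySem.List.foldl_add, zero_add]
  induction order using solution_alt.induct with
  | case1 => simp [solution_alt]
  | case2 d => simp [solution_alt, pvPrice_eq]
  | case3 a b t mid ih1 ih2 =>
      have hm : (a :: b :: t).length / 2 = mid := rfl
      rw [solution_alt, hm, ← ih1, ← ih2, ← List.sum_append, ← List.map_append, List.take_append_drop]

-- ===== VERDICT (by name: the statement is the Claim_ definition above) =====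
theorem solution_spec : Claim_equal_solution := by
  intro order _
  exact solution_eq_alt order
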